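-- pv_equiv track=rewrite | github.com/tusharv01/LINECODER | LineEncoder.py | delta_demodulation
-- ===== SOURCE A (Python) =====
-- def delta_demodulation(bits):
--     result = [1 if bits[0] == -1 else 0]
--     for i in range(1, len(bits)):
--         if bits[i] == 1:
--             result.append(result[-1] ^ 1)
--         else:
--             result.append(result[-1])
--     return result
-- ===== SOURCE B (Python) =====
-- def delta_demodulation(bits):
--     init = 1 if bits[0] == -1 else 0
--     # pass 1: run-length encode the delta stream into run lengths ending at each toggle
--     runs = []
--     cnt = 1  # the seed position belongs to the first run
--     for b in bits[1:]:
--         if b == 1: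
--             runs.append(cnt)
--             cnt = 0
--         cnt += 1
--     runs.append(cnt)
--     # pass 2: expand the runs with alternating output values
--     out = []
--     val = init
--     for r in runs:
--         out.extend([val] * r)
--         val ^= 1
--     return out
-- ===== Notes on version B (the rewrite author's own statement) =====
-- stated objective: alternative
-- what changed: Replaces A's per-element running-XOR append with run-length encoding: pass 1 groups the delta stream into run lengths ending at each toggle, pass 2 expands the runs with alternating output values.
import Mathlib
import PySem

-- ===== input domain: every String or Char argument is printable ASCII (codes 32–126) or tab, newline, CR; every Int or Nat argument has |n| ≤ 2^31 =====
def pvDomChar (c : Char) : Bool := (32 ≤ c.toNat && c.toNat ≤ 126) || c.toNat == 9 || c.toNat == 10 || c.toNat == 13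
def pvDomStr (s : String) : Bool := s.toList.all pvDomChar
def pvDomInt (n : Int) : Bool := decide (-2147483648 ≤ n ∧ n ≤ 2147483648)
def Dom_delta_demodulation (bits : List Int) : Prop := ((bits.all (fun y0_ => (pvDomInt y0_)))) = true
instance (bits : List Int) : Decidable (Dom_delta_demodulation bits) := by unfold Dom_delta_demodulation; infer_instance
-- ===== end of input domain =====

-- B run-length encodes the delta stream (runs ending at each toggle) and then expands the runs
-- with alternating values, instead of A's per-element running-XOR append; same cost, different algorithmic structure.


-- ===== PORT A =====
-- A: result = [1 if bits[0]==-1 else 0]; loop over the remaining bits appending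
-- result[-1]^1 when the bit is 1, else result[-1].  (On [] Python raises IndexError: Pre_.)
def delta_demodulation (bits : List Int) : List Int :=
  match bits with
  | [] => []   -- unreachable under Pre_ (Python raises IndexError)
  | b0 :: rest =>
    rest.foldl (fun result bi =>
      if bi = 1 then result ++ [PySem.Int.bxor result.getLast! 1]
      else result ++ [result.getLast!])
      [if b0 = -1 then (1 : Int) else 0]

-- ===== PORT B =====
-- pass 1 of Source B: fold building (runs, cnt); per iteration: if b==1 {runs.append(cnt); cnt=0}; cnt+=1
def pvRunsStep (st : List Nat × Nat) (b : Int) : List Nat × Nat :=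
  let st := if b = 1 then (st.1 ++ [st.2], 0) else st
  (st.1, st.2 + 1)

-- pass 2 of Source B: out.extend([val]*r); val ^= 1
def pvExpandStep (ov : List Int × Int) (r : Nat) : List Int × Int :=
  (ov.1 ++ List.replicate r ov.2, PySem.Int.bxor ov.2 1)

def delta_demodulation_alt (bits : List Int) : List Int :=
  match bits with
  | [] => []   -- unreachable under Pre_ (Python raises IndexError)
  | b0 :: rest =>
    let init : Int := if b0 = -1 then 1 else 0
    let rc := rest.foldl pvRunsStep ([], 1)
    let runs := rc.1 ++ [rc.2]
    (runs.foldl pvExpandStep ([], init)).1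

-- ===== PRECONDITION & SPEC =====
-- A (and B) raise IndexError on the empty list; Pre_ excludes exactly that input.
def Pre_delta_demodulation (bits : List Int) : Prop := bits ≠ []
instance (bits : List Int) : Decidable (Pre_delta_demodulation bits) := by unfold Pre_delta_demodulation; infer_instance
def pvWitness_delta_demodulation : List Int := [-1, 1, 0, 1]

def Spec_delta_demodulation (bits : List Int) (out : List Int) : Prop := out = delta_demodulation_alt bits
instance (bits : List Int) (out : List Int) : Decidable (Spec_delta_demodulation bits out) := by unfold Spec_delta_demodulation; infer_instance

-- ===== CLAIM (what is proved, stated in full; the proofs are below) =====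
def Claim_equal_delta_demodulation : Prop := ∀ (bits : List Int), Dom_delta_demodulation bits → Pre_delta_demodulation bits → Spec_delta_demodulation bits (delta_demodulation bits)

-- ===== LEMMAS AND PROOFS =====

theorem pvGetLast!_concat (res : List Int) (a : Int) : (res ++ [a]).getLast! = a := by
  induction res with
  | nil => rfl
  | cons x xs ih => simp [List.getLast!, List.getLast?]

theorem pvGetLast!_append_replicate (out : List Int) (c : Nat) (v : Int) :
    (out ++ List.replicate (c + 1) v).getLast! = v := by
  rw [List.replicate_succ', ← List.append_assoc]
  exact pvGetLast!_concat _ _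

-- pass-1 accumulator lemma: the runs list built so far is a prefix passed through unchanged
theorem pvRuns_acc (bs : List Int) (runs0 : List Nat) (c : Nat) :
    bs.foldl pvRunsStep (runs0, c)
      = (runs0 ++ (bs.foldl pvRunsStep ([], c)).1, (bs.foldl pvRunsStep ([], c)).2) := by
  induction bs generalizing runs0 c with
  | nil => simp
  | cons b bs ih =>
    by_cases hb : b = 1
    · simp only [List.foldl_cons, pvRunsStep, hb, if_pos]
      simp only [List.nil_append, Nat.zero_add]
      rw [ih (runs0 ++ [c]) 1, ih [c] 1]
      simp
    · simp only [List.foldl_cons, pvRunsStep, hb, if_neg, not_false_iff]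
      exact ih runs0 (c + 1)

-- main invariant: A's loop from out ++ [val]*(c+1) equals B's encode-then-expand continuation
theorem pvMain (bs : List Int) (c : Nat) (val : Int) (out : List Int) :
    bs.foldl (fun result bi =>
        if bi = 1 then result ++ [PySem.Int.bxor result.getLast! 1]
        else result ++ [result.getLast!]) (out ++ List.replicate (c + 1) val)
      = (let rc := bs.foldl pvRunsStep ([], c + 1);
         ((rc.1 ++ [rc.2]).foldl pvExpandStep (out, val)).1) := by
  induction bs generalizing c val out with
  | nil => simp [pvExpandStep]
  | cons b bs ih =>
    by_cases hb : b = 1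
    · simp only [List.foldl_cons, hb, if_pos, pvRunsStep, pvGetLast!_append_replicate]
      have hstate : (out ++ List.replicate (c + 1) val) ++ [PySem.Int.bxor val 1]
          = (out ++ List.replicate (c + 1) val) ++ List.replicate (0 + 1) (PySem.Int.bxor val 1) := by
        simp
      rw [hstate, ih 0 (PySem.Int.bxor val 1) (out ++ List.replicate (c + 1) val)]
      simp only [List.nil_append, Nat.zero_add]
      rw [pvRuns_acc bs [c + 1] 1]
      simp [pvExpandStep, List.foldl_append]
    · simp only [List.foldl_cons, hb, if_neg, not_false_iff, pvRunsStep,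
        pvGetLast!_append_replicate]
      have hstate : (out ++ List.replicate (c + 1) val) ++ [val]
          = out ++ List.replicate (c + 1 + 1) val := by
        simp [List.replicate_succ']
      rw [hstate]
      exact ih (c + 1) val out

-- ===== VERDICT (by name: the statement is the Claim_ definition above) =====
theorem delta_demodulation_spec : Claim_equal_delta_demodulation := by
  intro bits _ hpre
  unfold Spec_delta_demodulation
  match bits with
  | [] => exact absurd rfl hpre
  | b0 :: rest =>
    simp only [delta_demodulation, delta_demodulation_alt]
    have := pvMain rest 0 (if b0 = -1 then (1 : Int) else 0) []
    simpa using this
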